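-- pv_equiv track=rewrite | github.com/VyacheslavZalygin/PyEducation2021 | ReshuEGE/35998.py | func
-- ===== SOURCE A (Python) =====
-- def func(string):
--   a = 0
--   letters = {}
--   m = -1
--   for i, l in enumerate(string):
--     if l == 'A':
--       a += 1
--     if not l in letters:
--       letters[l] = i
--     else:
--       if m < i - letters[l]:
--         m = i - letters[l]
--   return m if a < 25 else -1
-- ===== SOURCE B (Python) =====
-- def func(string):
--     # one pass builds a first/last-index table; a separate reduction pass takes the max span
--     table = {}
--     for i, l in enumerate(string):
--         if l in table:
--             table[l] = (table[l][0], i)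
--         else:
--             table[l] = (i, i)
--     m = max((last - first for first, last in table.values() if last > first), default=-1)
--     return m if string.count('A') < 25 else -1
-- ===== Notes on version B (the rewrite author's own statement) =====
-- stated objective: alternative
-- what changed: A threads a capital-A counter, a first-occurrence dict and a running max through one incremental loop; B builds a first/last-index table in one pass and then computes the max span in a separate reduction pass over the table's values, taking the capital-A count from str.count.
import Mathlib
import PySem

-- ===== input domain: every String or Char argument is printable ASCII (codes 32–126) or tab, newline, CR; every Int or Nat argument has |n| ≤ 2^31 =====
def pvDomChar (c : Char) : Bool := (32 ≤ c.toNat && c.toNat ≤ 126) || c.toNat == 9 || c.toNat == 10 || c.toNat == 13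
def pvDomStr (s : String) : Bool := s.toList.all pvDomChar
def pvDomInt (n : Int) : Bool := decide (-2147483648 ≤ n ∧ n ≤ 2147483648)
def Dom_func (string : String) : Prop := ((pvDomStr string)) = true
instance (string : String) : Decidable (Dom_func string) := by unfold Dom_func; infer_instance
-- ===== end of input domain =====

-- B replaces A's single incremental loop (counter + first-occurrence dict + running max)
-- by a first/last-index table built in one pass plus a separate max-reduction pass over it
-- (objective: alternative decomposition, same cost).

-- ===== PORT A =====
-- A's loop body: count 'A', record first occurrence, else update running max.
def funcStepA (st : Int × PySem.Dict Char Int × Int) (il : Int × Char) :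
    Int × PySem.Dict Char Int × Int :=
  let a := if il.2 == 'A' then st.1 + 1 else st.1
  if !(st.2.1.contains il.2) then
    (a, st.2.1.insert il.2 il.1, st.2.2)
  else
    (a, st.2.1,
      if st.2.2 < il.1 - st.2.1.getD il.2 0 then il.1 - st.2.1.getD il.2 0 else st.2.2)

def func (string : String) : Int :=
  let st := (PySem.List.enumerate string.toList).foldl funcStepA (0, PySem.Dict.empty, -1)
  if st.1 < 25 then st.2.2 else -1

-- ===== PORT B =====
-- B's table-building loop body: record first and last index of each character.
def funcStepB (t : PySem.Dict Char (Int × Int)) (il : Int × Char) :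
    PySem.Dict Char (Int × Int) :=
  if t.contains il.2 then t.insert il.2 ((t.getD il.2 (0, 0)).1, il.1)
  else t.insert il.2 (il.1, il.1)

-- one reduction step of max(last - first for first, last in … if last > first, default=-1)
def funcRStep (m : Int) (p : Int × Int) : Int :=
  if p.2 > p.1 then max m (p.2 - p.1) else m

def funcRed (vs : List (Int × Int)) : Int := vs.foldl funcRStep (-1)

def func_alt (string : String) : Int :=
  let table := (PySem.List.enumerate string.toList).foldl funcStepB PySem.Dict.empty
  if (PySem.Str.count string "A" : Int) < 25 then funcRed table.values else -1

-- ===== PRECONDITION & SPEC =====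
def Spec_func (string : String) (out : Int) : Prop := out = func_alt string
instance (string : String) (out : Int) : Decidable (Spec_func string out) := by unfold Spec_func; infer_instance

-- ===== CLAIM (what is proved, stated in full; the proofs are below) =====
def Claim_equal_func : Prop := ∀ (string : String), Dom_func string → Spec_func string (func string)

-- ===== LEMMAS AND PROOFS =====

-- s.count(sub) for a single-character sub is the character count
lemma func_count_go_single (c : Char) : ∀ (s : List Char) (fuel acc : Nat), s.length ≤ fuel →
    PySem.Chars.count.go [c] fuel s acc = acc + s.count c := by
  intro s
  induction s with
  | nil => intro fuel acc h; cases fuel <;> simp [PySem.Chars.count.go]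
  | cons h t ih =>
    intro fuel acc hl
    cases fuel with
    | zero => simp at hl
    | succ f =>
      rw [PySem.Chars.count.go]
      simp only [List.isPrefixOf_cons₂, List.isPrefixOf_nil_left, Bool.and_true, List.length_cons,
        List.length_nil, List.drop_succ_cons, List.drop_zero, beq_iff_eq] at *
      by_cases hc : c = h
      · rw [if_pos hc, ih f (acc + 1) (by omega), List.count_cons]
        simp [hc]; omega
      · rw [if_neg hc, ih f acc (by omega), List.count_cons]
        simp [Ne.symm hc]

lemma func_count_single (s : List Char) (c : Char) : PySem.Chars.count s [c] = s.count c := by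
  simp [PySem.Chars.count, func_count_go_single]

-- pushing a max through the reduction fold
lemma func_foldl_rstep_max (w : List (Int × Int)) : ∀ z1 z2 : Int,
    w.foldl funcRStep (max z1 z2) = max z1 (w.foldl funcRStep z2) := by
  induction w with
  | nil => intro z1 z2; rfl
  | cons p w ih =>
    intro z1 z2
    simp only [List.foldl_cons, funcRStep]
    split_ifs with h
    · rw [max_assoc, ih]
    · exact ih z1 z2

-- L mirrors T's first components: same keys, mirrored lookups
lemma func_keys_eq {L : PySem.Dict Char Int} {T : PySem.Dict Char (Int × Int)}
    (hL : L.items = T.items.map (fun p => (p.1, p.2.1))) : L.keys = T.keys := by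
  simp only [PySem.Dict.keys, hL, List.map_map]
  rfl

lemma func_get?_mirror {L : PySem.Dict Char Int} {T : PySem.Dict Char (Int × Int)}
    (hnd : T.keys.Nodup) (hL : L.items = T.items.map (fun p => (p.1, p.2.1))) (c : Char) :
    L.get? c = (T.get? c).map Prod.fst := by
  have hndL : L.keys.Nodup := by rw [func_keys_eq hL]; exact hnd
  cases h : T.get? c with
  | none =>
    simp only [Option.map_none]
    rw [PySem.Dict.get?_eq_none_iff_not_mem_keys] at h ⊢
    rwa [func_keys_eq hL]
  | some v =>
    have hmem : (c, v) ∈ T.items := PySem.Dict.mem_items_of_get?_eq_some _ h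
    have : (c, v.1) ∈ L.items := by
      rw [hL]; exact List.mem_map.mpr ⟨(c, v), hmem, rfl⟩
    simpa using PySem.Dict.get?_of_mem_items _ this hndL

-- decomposing an existing entry: insert at that key replaces exactly it, in place
lemma func_insert_decomp (T : PySem.Dict Char (Int × Int)) (hnd : T.keys.Nodup)
    (c : Char) (v : Int × Int) (h : T.get? c = some v) :
    ∃ u w, T.items = u ++ (c, v) :: w ∧ (∀ p ∈ u, p.1 ≠ c) ∧ (∀ p ∈ w, p.1 ≠ c) ∧
      ∀ v', (T.insert c v').items = u ++ (c, v') :: w := by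
  obtain ⟨u, w, hitems⟩ := List.append_of_mem (PySem.Dict.mem_items_of_get?_eq_some _ h)
  have hnd2 : ((u.map Prod.fst) ++ c :: (w.map Prod.fst)).Nodup := by
    have h2 := hnd
    simp only [PySem.Dict.keys, hitems, List.map_append, List.map_cons] at h2
    exact h2
  have hdisj := List.disjoint_of_nodup_append hnd2
  have hu : ∀ p ∈ u, p.1 ≠ c := fun p hp hpc =>
    hdisj (List.mem_map.mpr ⟨p, hp, rfl⟩) (hpc ▸ List.mem_cons_self)
  have hw : ∀ p ∈ w, p.1 ≠ c := by
    intro p hp hpc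
    have h3 : (c :: w.map Prod.fst).Nodup := hnd2.of_append_right
    exact (List.nodup_cons.mp h3).1 (hpc ▸ List.mem_map.mpr ⟨p, hp, rfl⟩)
  refine ⟨u, w, hitems, hu, hw, ?_⟩
  intro v'
  have hcont : T.contains c = true := by
    rw [PySem.Dict.contains_eq_isSome_get?, h]; rfl
  have hmap : ∀ (l : List (Char × (Int × Int))), (∀ p ∈ l, p.1 ≠ c) →
      l.map (fun p => if (p.1 == c) = true then (c, v') else p) = l := by
    intro l hl
    induction l with
    | nil => rfl
    | cons q t iht =>
      rw [List.map_cons, if_neg (by simp [hl q List.mem_cons_self]),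
        iht (fun p hp => hl p (List.mem_cons_of_mem _ hp))]
  rw [PySem.Dict.items_insert_of_contains _ _ hcont, hitems, List.map_append, List.map_cons,
    if_pos (by simp), hmap u hu, hmap w hw]

-- the main invariant: A's running (count, first-dict, max) against B's first/last table
lemma func_main : ∀ (ps : List (Int × Char)) (a m : Int) (L : PySem.Dict Char Int)
    (T : PySem.Dict Char (Int × Int)),
    T.keys.Nodup →
    L.items = T.items.map (fun p => (p.1, p.2.1)) →
    (∀ p ∈ T.items, p.2.1 ≤ p.2.2) →
    (∀ p ∈ T.items, ∀ q ∈ ps, p.2.2 < q.1) →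
    ps.Pairwise (fun p q => p.1 < q.1) →
    m = funcRed T.values →
    (ps.foldl funcStepA (a, L, m)).1 = a + (ps.countP (fun p => p.2 == 'A') : Int) ∧
    (ps.foldl funcStepA (a, L, m)).2.2 = funcRed ((ps.foldl funcStepB T).values) := by
  intro ps
  induction ps with
  | nil =>
    intro a m L T hnd hL hfl hlt hpw hm
    simpa using hm
  | cons p rest ih =>
    intro a m L T hnd hL hfl hlt hpw hm
    obtain ⟨i, c⟩ := p
    have hkeys : L.keys = T.keys := func_keys_eq hL
    have hcontEq : L.contains c = T.contains c := by
      rw [PySem.Dict.contains_eq_decide_mem_keys, PySem.Dict.contains_eq_decide_mem_keys, hkeys]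
    have hpw' : rest.Pairwise (fun p q => p.1 < q.1) := (List.pairwise_cons.mp hpw).2
    have hlt_cur : ∀ q ∈ rest, i < q.1 := (List.pairwise_cons.mp hpw).1
    by_cases hTc : T.contains c = true
    · -- existing key: A updates the max, B rewrites the last index in place
      have hsome : (T.get? c).isSome := by
        rw [← PySem.Dict.contains_eq_isSome_get?, hTc]
      obtain ⟨⟨f, last⟩, hv⟩ := Option.isSome_iff_exists.mp hsome
      have hLg : L.get? c = some f := by
        rw [func_get?_mirror hnd hL c, hv]; rfl
      have hmemT : (c, (f, last)) ∈ T.items := PySem.Dict.mem_items_of_get?_eq_some _ hv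
      have hfl1 : f ≤ last := hfl _ hmemT
      have hlast : last < i := hlt _ hmemT (i, c) (List.mem_cons_self)
      obtain ⟨u, w, hitems, hu, hw, hins⟩ := func_insert_decomp T hnd c (f, last) hv
      have hstepA : funcStepA (a, L, m) (i, c) =
          ((if c == 'A' then a + 1 else a), L, max m (i - f)) := by
        simp only [funcStepA, hcontEq, hTc, Bool.not_true, Bool.false_eq_true, if_false,
          PySem.Dict.getD_of_get?_eq_some _ _ hLg]
        congr 1
        · congr 1
          rcases le_or_gt (i - f) m with h | h
          · rw [if_neg (by omega), max_eq_left h]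
          · rw [if_pos (by omega), max_eq_right (le_of_lt h)]
      have hstepB : funcStepB T (i, c) = T.insert c (f, i) := by
        simp [funcStepB, hTc, PySem.Dict.getD_of_get?_eq_some _ _ hv]
      -- the reduction over the rewritten table
      have hred : max m (i - f) = funcRed ((T.insert c (f, i)).values) := by
        have hvals : (T.insert c (f, i)).values =
            u.map Prod.snd ++ (f, i) :: w.map Prod.snd := by
          simp [PySem.Dict.values, hins (f, i)]
        have hvalsOld : T.values = u.map Prod.snd ++ (f, last) :: w.map Prod.snd := by
          simp [PySem.Dict.values, hitems]
        rw [hvals]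
        rw [hm, hvalsOld]
        unfold funcRed
        rw [List.foldl_append, List.foldl_append, List.foldl_cons, List.foldl_cons]
        set y := (u.map Prod.snd).foldl funcRStep (-1) with hy
        have hnew : funcRStep y (f, i) = max (i - f) y := by
          simp only [funcRStep]; rw [if_pos (by omega)]; exact max_comm _ _
        rw [hnew, func_foldl_rstep_max]
        by_cases h2 : last > f
        · have hold : funcRStep y (f, last) = max (last - f) y := by
            simp only [funcRStep]; rw [if_pos (by omega)]; exact max_comm _ _
          rw [hold, func_foldl_rstep_max]
          omega
        · have hold : funcRStep y (f, last) = y := by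
            simp only [funcRStep]; rw [if_neg (by omega)]
          rw [hold]
          omega
      have hmemsub : ∀ p ∈ u ++ w, p ∈ T.items := by
        intro p hp
        rw [hitems]
        rcases List.mem_append.mp hp with h | h
        · exact List.mem_append.mpr (Or.inl h)
        · exact List.mem_append.mpr (Or.inr (List.mem_cons_of_mem _ h))
      have ihres := ih (if c == 'A' then a + 1 else a) (max m (i - f)) L (T.insert c (f, i))
        (PySem.Dict.nodup_keys_insert _ _ _ hnd)
        (by
          rw [hins (f, i), hL, hitems]
          simp)
        (by
          intro p hp
          rw [hins (f, i)] at hp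
          rcases List.mem_append.mp hp with h | h
          · exact hfl _ (hmemsub p (List.mem_append.mpr (Or.inl h)))
          · rcases List.mem_cons.mp h with h | h
            · subst h; simp; omega
            · exact hfl _ (hmemsub p (List.mem_append.mpr (Or.inr h))))
        (by
          intro p hp q hq
          rw [hins (f, i)] at hp
          rcases List.mem_append.mp hp with h | h
          · exact hlt _ (hmemsub p (List.mem_append.mpr (Or.inl h))) q (List.mem_cons_of_mem _ hq)
          · rcases List.mem_cons.mp h with h | h
            · subst h; exact hlt_cur q hq
            · exact hlt _ (hmemsub p (List.mem_append.mpr (Or.inr h))) q (List.mem_cons_of_mem _ hq))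
        hpw' hred
      rw [List.foldl_cons, List.foldl_cons, hstepA, hstepB]
      refine ⟨?_, ihres.2⟩
      rw [ihres.1, List.countP_cons]
      by_cases hA : c == 'A'
      · simp [hA]; ring
      · simp [hA]
    · -- fresh key: both sides append a new entry; the reduction is unchanged
      have hTc' : T.contains c = false := by simpa using hTc
      have hLc : L.contains c = false := by rw [hcontEq]; exact hTc'
      have hstepA : funcStepA (a, L, m) (i, c) =
          ((if c == 'A' then a + 1 else a), L.insert c i, m) := by
        simp [funcStepA, hLc]
      have hstepB : funcStepB T (i, c) = T.insert c (i, i) := by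
        simp [funcStepB, hTc']
      have hitems' : (T.insert c (i, i)).items = T.items ++ [(c, (i, i))] :=
        PySem.Dict.items_insert_of_not_contains _ _ hTc'
      have ihres := ih (if c == 'A' then a + 1 else a) m (L.insert c i) (T.insert c (i, i))
        (PySem.Dict.nodup_keys_insert _ _ _ hnd)
        (by
          rw [PySem.Dict.items_insert_of_not_contains _ _ hLc, hitems', hL]
          simp)
        (by
          intro p hp
          rw [hitems'] at hp
          rcases List.mem_append.mp hp with h | h
          · exact hfl _ h
          · simp at h; subst h; simp)
        (by
          intro p hp q hq
          rw [hitems'] at hp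
          rcases List.mem_append.mp hp with h | h
          · exact hlt _ h q (List.mem_cons_of_mem _ hq)
          · simp at h; subst h; exact hlt_cur q hq)
        hpw'
        (by
          have hvals : (T.insert c (i, i)).values = T.values ++ [(i, i)] := by
            simp [PySem.Dict.values, hitems']
          rw [hvals]
          unfold funcRed
          rw [List.foldl_append]
          simp only [List.foldl_cons, List.foldl_nil, funcRStep]
          rw [if_neg (by omega)]
          exact hm)
      rw [List.foldl_cons, List.foldl_cons, hstepA, hstepB]
      refine ⟨?_, ihres.2⟩
      rw [ihres.1, List.countP_cons]
      by_cases hA : c == 'A'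
      · simp [hA]; ring
      · simp [hA]

-- the 'A'-count over the enumeration is string.count('A')
lemma func_countP_enumerate (xs : List Char) (s : Int) :
    (PySem.List.enumerate xs s).countP (fun p => p.2 == 'A') = xs.count 'A' := by
  conv_rhs => rw [← PySem.List.map_snd_enumerate xs s]
  rw [List.count, List.countP_map]
  rfl

-- ===== VERDICT (by name: the statement is the Claim_ definition above) =====
theorem func_spec : Claim_equal_func := by
  unfold Claim_equal_func Spec_func
  intro s _hdom
  simp only [func, func_alt]
  obtain ⟨h1, h2⟩ := func_main (PySem.List.enumerate s.toList) 0 (-1)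
    PySem.Dict.empty PySem.Dict.empty
    (by simp [PySem.Dict.keys, PySem.Dict.empty])
    (by simp [PySem.Dict.empty])
    (by simp [PySem.Dict.empty])
    (by simp [PySem.Dict.empty])
    (PySem.List.pairwise_lt_enumerate _ _)
    (by simp [funcRed, PySem.Dict.values, PySem.Dict.empty])
  have hcount : ((PySem.Str.count s "A" : Nat) : Int) =
      0 + ((PySem.List.enumerate s.toList).countP (fun p => p.2 == 'A') : Int) := by
    rw [func_countP_enumerate]
    simp [PySem.Str.count, func_count_single]
  rw [h1, h2, ← hcount]
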